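-- pv_equiv track=rewrite | github.com/tsenoner/toxprot25 | src/data_processing/parse_sprot_dat.py | extract_ptm_details
-- ===== SOURCE A (Python) =====
-- def extract_ptm_details(lines, start_idx):
--     """Extract PTM note and evidence from feature continuation lines"""
--     note = ""
--     evidence_list = []
--     i = start_idx + 1
--
--     # Process all continuation lines for this feature
--     while i < len(lines) and lines[i].startswith("FT                   "):
--         line_content = lines[i][21:]  # Get content after "FT                   "
--
--         # Extract note - format: /note="content..."
--         if line_content.strip().startswith('/note="'):
--             # Start extracting note content (without the '/note="' prefix)
--             note_parts = [line_content.strip()[7:]]  # Remove '/note="'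
--
--             # Check if note ends on this line
--             if not note_parts[0].rstrip().endswith('"'):
--                 # Multi-line note - keep reading
--                 i += 1
--                 while i < len(lines) and lines[i].startswith(
--                     "FT                   "
--                 ):
--                     next_content = lines[i][21:].strip()
--                     # Check if this is a new qualifier
--                     if next_content.startswith("/"):
--                         # Don't consume this line, it's a new qualifier
--                         i -= 1
--                         break
--                     note_parts.append(next_content)
--                     # Check if note ends on this line
--                     if next_content.rstrip().endswith('"'):
--                         break
--                     i += 1
--
--             # Join all parts and remove trailing quote
--             note = " ".join(note_parts).rstrip().rstrip('"')
--
--         # Extract evidence - format: /evidence="ECO:..."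
--         elif line_content.strip().startswith('/evidence="'):
--             # Start extracting evidence content (without the '/evidence="' prefix)
--             evidence_parts = [line_content.strip()[11:]]  # Remove '/evidence="'
--
--             # Check if evidence ends on this line
--             if not evidence_parts[0].rstrip().endswith('"'):
--                 # Multi-line evidence - keep reading
--                 i += 1
--                 while i < len(lines) and lines[i].startswith(
--                     "FT                   "
--                 ):
--                     next_content = lines[i][21:].strip()
--                     # Check if this is a new qualifier
--                     if next_content.startswith("/"):
--                         # Don't consume this line, it's a new qualifier
--                         i -= 1
--                         break
--                     evidence_parts.append(next_content)
--                     # Check if evidence ends on this line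
--                     if next_content.rstrip().endswith('"'):
--                         break
--                     i += 1
--
--             # Join all parts, remove trailing quote, and add to list
--             evidence_str = "".join(evidence_parts).rstrip().rstrip('"')
--             if evidence_str:
--                 evidence_list.append(evidence_str)
--
--         i += 1
--
--     # Combine multiple evidence codes
--     evidence = ", ".join(evidence_list) if evidence_list else ""
--
--     return note, evidence
-- ===== SOURCE B (Python) =====
-- FT_CONT = "FT                   "
--
--
-- def _close(mode, parts, note, evidence_list):
--     """Finish the open qualifier value: notes are space-joined, evidence is
--     concatenated; both are trimmed of trailing whitespace and quotes."""
--     if mode == "note":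
--         note = " ".join(parts).rstrip().rstrip('"')
--     else:
--         ev = "".join(parts).rstrip().rstrip('"')
--         if ev:
--             evidence_list = evidence_list + [ev]
--     return note, evidence_list
--
--
-- def extract_ptm_details(lines, start_idx):
--     """Extract PTM note and evidence from feature continuation lines"""
--     note = ""
--     evidence_list = []
--     mode = None  # None | "note" | "evidence"
--     parts = []
--     i = start_idx + 1
--     while i < len(lines):
--         if not lines[i].startswith(FT_CONT):
--             if mode is None:
--                 break
--             # a non-continuation line ends the open multi-line value; the scan
--             # consumes it and carries on
--             note, evidence_list = _close(mode, parts, note, evidence_list)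
--             mode = None
--             i += 1
--             continue
--         c = lines[i][21:].strip()
--         if mode is not None and c.startswith("/"):
--             # a new qualifier ends the open value; re-handle this line below
--             note, evidence_list = _close(mode, parts, note, evidence_list)
--             mode = None
--         if mode is None:
--             if c.startswith('/note="'):
--                 if c[7:].endswith('"'):
--                     note = c[7:].rstrip('"')
--                 else:
--                     mode, parts = "note", [c[7:]]
--             elif c.startswith('/evidence="'):
--                 if c[11:].endswith('"'):
--                     ev = c[11:].rstrip('"')
--                     if ev:
--                         evidence_list = evidence_list + [ev]
--                 else:
--                     mode, parts = "evidence", [c[11:]]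
--         else:
--             parts.append(c)
--             if c.endswith('"'):
--                 note, evidence_list = _close(mode, parts, note, evidence_list)
--                 mode = None
--         i += 1
--     if mode is not None:
--         note, evidence_list = _close(mode, parts, note, evidence_list)
--     return note, ", ".join(evidence_list)
-- ===== Notes on version B (the rewrite author's own statement) =====
-- stated objective: alternative
-- what changed: A's nested while-loops with an i-rewind hack (inner loops re-scanning continuation lines per qualifier) are replaced by a single flat scan with an explicit open-qualifier mode state and a shared close step.
import Mathlib
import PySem

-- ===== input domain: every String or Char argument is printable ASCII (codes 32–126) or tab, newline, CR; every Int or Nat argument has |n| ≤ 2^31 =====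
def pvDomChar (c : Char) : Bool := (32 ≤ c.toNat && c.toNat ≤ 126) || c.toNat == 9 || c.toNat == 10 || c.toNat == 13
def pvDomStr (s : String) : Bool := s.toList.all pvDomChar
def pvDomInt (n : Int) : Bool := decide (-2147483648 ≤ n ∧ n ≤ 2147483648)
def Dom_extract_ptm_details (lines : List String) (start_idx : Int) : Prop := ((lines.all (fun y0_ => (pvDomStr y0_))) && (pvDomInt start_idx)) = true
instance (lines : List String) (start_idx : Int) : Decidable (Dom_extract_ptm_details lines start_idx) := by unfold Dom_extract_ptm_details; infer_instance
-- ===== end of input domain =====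

-- B replaces A's nested while-loops (with their i-rewind hack) by one flat scan with an
-- explicit open-qualifier mode; same return value, similar cost (objective: alternative).

-- the 21-character continuation-line prefix "FT" + 19 spaces
def pvPrefix : String := "FT                   "

-- lines[i] (Python indexing; the .getD "" default is only reached outside Pre_, where Python raises)
def pvLine (lines : List String) (i : Int) : String := (PySem.List.pyGet? lines i).getD ""

-- exact port of Python s.rstrip('"') (strip ALL trailing '"' characters)
def pvRstripQ (s : String) : String := String.ofList (s.toList.reverse.dropWhile (· == '"')).reverse

-- ===== PORT A =====
-- A's two inner while-loops are textually identical; this is that loop (returns the grown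
-- parts list and the final i, with the `i -= 1` before the new-qualifier break).
-- The Nat fuel only makes the while-loop total; callers always pass enough for it to never run out.
def pvACollect (lines : List String) : Nat → Int → List String → List String × Int
  | 0, i, parts => (parts, i)
  | fuel + 1, i, parts =>
    if i < (lines.length : Int) ∧ PySem.Str.startswith (pvLine lines i) pvPrefix = true then
      let nc := PySem.Str.strip (PySem.Str.slice (pvLine lines i) (some 21) none)
      if PySem.Str.startswith nc "/" then (parts, i - 1)
      else
        let parts' := parts ++ [nc]
        if PySem.Str.endswith (PySem.Str.rstrip nc) "\"" then (parts', i)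
        else pvACollect lines fuel (i + 1) parts'
    else (parts, i)

-- A's outer while-loop (fuel: totality only)
def pvAOuter (lines : List String) : Nat → Int → String → List String → String × List String
  | 0, _, note, evs => (note, evs)
  | fuel + 1, i, note, evs =>
    if i < (lines.length : Int) ∧ PySem.Str.startswith (pvLine lines i) pvPrefix = true then
      let s := PySem.Str.strip (PySem.Str.slice (pvLine lines i) (some 21) none)
      if PySem.Str.startswith s "/note=\"" then
        let p0 := PySem.Str.slice s (some 7) none
        let r := if PySem.Str.endswith (PySem.Str.rstrip p0) "\"" = false
                 then pvACollect lines fuel (i + 1) [p0] else ([p0], i)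
        pvAOuter lines fuel (r.2 + 1) (pvRstripQ (PySem.Str.rstrip (PySem.Str.join " " r.1))) evs
      else if PySem.Str.startswith s "/evidence=\"" then
        let p0 := PySem.Str.slice s (some 11) none
        let r := if PySem.Str.endswith (PySem.Str.rstrip p0) "\"" = false
                 then pvACollect lines fuel (i + 1) [p0] else ([p0], i)
        let ev := pvRstripQ (PySem.Str.rstrip (PySem.Str.join "" r.1))
        pvAOuter lines fuel (r.2 + 1) note (if ev ≠ "" then evs ++ [ev] else evs)
      else pvAOuter lines fuel (i + 1) note evs
    else (note, evs)

def extract_ptm_details (lines : List String) (start_idx : Int) : String × String :=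
  let r := pvAOuter lines (((lines.length : Int) - (start_idx + 1)).toNat + 1) (start_idx + 1) "" []
  (r.1, if r.2 ≠ [] then PySem.Str.join ", " r.2 else "")

-- ===== PORT B =====
-- Source B's _close: finish the open qualifier value
def pvClose (mode : String) (parts : List String) (note : String) (evs : List String) : String × List String :=
  if mode == "note" then
    (pvRstripQ (PySem.Str.rstrip (PySem.Str.join " " parts)), evs)
  else
    let ev := pvRstripQ (PySem.Str.rstrip (PySem.Str.join "" parts))
    (note, if ev ≠ "" then evs ++ [ev] else evs)

-- Source B's shared `if mode is None:` block: handle line content c with no qualifier open;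
-- returns the next (mode, parts, note, evidence_list)
def pvBNormal (c : String) (parts : List String) (note : String) (evs : List String) :
    Option String × List String × String × List String :=
  if PySem.Str.startswith c "/note=\"" then
    let c7 := PySem.Str.slice c (some 7) none
    if PySem.Str.endswith c7 "\"" then (none, parts, pvRstripQ c7, evs)
    else (some "note", [c7], note, evs)
  else if PySem.Str.startswith c "/evidence=\"" then
    let c11 := PySem.Str.slice c (some 11) none
    if PySem.Str.endswith c11 "\"" then
      let ev := pvRstripQ c11
      (none, parts, note, if ev ≠ "" then evs ++ [ev] else evs)
    else (some "evidence", [c11], note, evs)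
  else (none, parts, note, evs)

-- Source B's single while-loop: flat scan with an explicit mode (fuel: totality only;
-- running out of fuel coincides with the i ≥ len(lines) exit, so both do the final close)
def pvBLoop (lines : List String) : Nat → Int → Option String → List String → String → List String → String × List String
  | 0, _, mode, parts, note, evs =>
    (match mode with
     | none => (note, evs)
     | some m => pvClose m parts note evs)
  | fuel + 1, i, mode, parts, note, evs =>
    if i < (lines.length : Int) then
      if PySem.Str.startswith (pvLine lines i) pvPrefix = true then
        let c := PySem.Str.strip (PySem.Str.slice (pvLine lines i) (some 21) none)
        match mode with
        | none =>
          let s := pvBNormal c parts note evs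
          pvBLoop lines fuel (i + 1) s.1 s.2.1 s.2.2.1 s.2.2.2
        | some m =>
          if PySem.Str.startswith c "/" then
            let r := pvClose m parts note evs
            let s := pvBNormal c parts r.1 r.2
            pvBLoop lines fuel (i + 1) s.1 s.2.1 s.2.2.1 s.2.2.2
          else
            let parts' := parts ++ [c]
            if PySem.Str.endswith c "\"" then
              let r := pvClose m parts' note evs
              pvBLoop lines fuel (i + 1) none parts' r.1 r.2
            else pvBLoop lines fuel (i + 1) (some m) parts' note evs
      else
        match mode with
        | none => (note, evs)     -- break; the after-loop close is skipped (mode is None)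
        | some m =>
          -- a non-continuation line ends the open multi-line value; scan carries on
          let r := pvClose m parts note evs
          pvBLoop lines fuel (i + 1) none parts r.1 r.2
    else
      match mode with
      | none => (note, evs)
      | some m => pvClose m parts note evs

def extract_ptm_details_alt (lines : List String) (start_idx : Int) : String × String :=
  let r := pvBLoop lines (((lines.length : Int) - (start_idx + 1)).toNat + 1) (start_idx + 1) none [] "" []
  (r.1, PySem.Str.join ", " r.2)

-- ===== PRECONDITION & SPEC =====
-- Pre_ excludes exactly the inputs where Python A raises IndexError: start_idx + 1 below -len(lines)
def Pre_extract_ptm_details (lines : List String) (start_idx : Int) : Prop :=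
  -(lines.length : Int) ≤ start_idx + 1
instance (lines : List String) (start_idx : Int) : Decidable (Pre_extract_ptm_details lines start_idx) := by
  unfold Pre_extract_ptm_details; infer_instance

def pvWitness_extract_ptm_details : List String × Int :=
  (["FT   MOD_RES         10",
    "FT                   /note=\"Phosphoserine\"",
    "FT                   /evidence=\"ECO:0000269\""], 0)

def Spec_extract_ptm_details (lines : List String) (start_idx : Int) (out : String × String) : Prop := out = extract_ptm_details_alt lines start_idx
instance (lines : List String) (start_idx : Int) (out : String × String) : Decidable (Spec_extract_ptm_details lines start_idx out) := by unfold Spec_extract_ptm_details; infer_instance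

-- ===== CLAIM (what is proved, stated in full; the proofs are below) =====
def Claim_equal_extract_ptm_details : Prop := ∀ (lines : List String) (start_idx : Int), Dom_extract_ptm_details lines start_idx → Pre_extract_ptm_details lines start_idx → Spec_extract_ptm_details lines start_idx (extract_ptm_details lines start_idx)

-- ===== LEMMAS AND PROOFS =====

-- whatever has no trailing whitespace stays fixed under rstrip; strip-images and their drops qualify
theorem pv_dropWhile_take (p : Char → Bool) (l : List Char) (j : Nat) :
    List.dropWhile p (List.take j (List.dropWhile p l)) = List.take j (List.dropWhile p l) := by
  cases hd : List.dropWhile p l with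
  | nil => simp
  | cons a t =>
      have hne : List.dropWhile p l ≠ [] := by simp [hd]
      have ha : p a = false := by
        have := List.head_dropWhile_not p hne
        simpa [hd] using this
      cases j with
      | zero => simp
      | succ j => simp [ha]

theorem pv_rstrip_drop_rstrip (l : List Char) (m : Nat) :
    PySem.Chars.rstrip (List.drop m (PySem.Chars.rstrip l)) = List.drop m (PySem.Chars.rstrip l) := by
  unfold PySem.Chars.rstrip
  rw [List.drop_reverse, List.reverse_reverse]
  rw [pv_dropWhile_take]

theorem pv_rstrip_strip (s : String) :
    PySem.Str.rstrip (PySem.Str.strip s) = PySem.Str.strip s := by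
  rw [← String.toList_inj]
  rw [PySem.Str.toList_rstrip, PySem.Str.toList_strip]
  unfold PySem.Chars.strip
  simpa using pv_rstrip_drop_rstrip (PySem.Chars.lstrip s.toList) 0

theorem pv_rstrip_slice_strip (s : String) (k : Int) (hk : 0 ≤ k) :
    PySem.Str.rstrip (PySem.Str.slice (PySem.Str.strip s) (some k) none) =
      PySem.Str.slice (PySem.Str.strip s) (some k) none := by
  rw [← String.toList_inj]
  rw [PySem.Str.toList_rstrip, PySem.Str.toList_slice]
  rw [PySem.Chars.slice_eq_listSlice, PySem.List.slice_from _ hk]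
  rw [PySem.Str.toList_strip]
  unfold PySem.Chars.strip
  exact pv_rstrip_drop_rstrip (PySem.Chars.lstrip s.toList) k.toNat

theorem pv_join_singleton (sep p : String) : PySem.Str.join sep [p] = p := by
  rw [← String.toList_inj]
  rw [PySem.Str.toList_join]
  simp [PySem.Chars.join_singleton]

-- the inner loop never moves i below i - 1 (A's `i -= 1` happens at most once, after ≥ 0 steps)
theorem pvACollect_ge (lines : List String) :
    ∀ (fuel : Nat) (i : Int) (parts : List String), i - 1 ≤ (pvACollect lines fuel i parts).2 := by
  intro fuel
  induction fuel with
  | zero => intro i parts; simp only [pvACollect]; omega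
  | succ fuel ih =>
      intro i parts
      simp only [pvACollect]
      split_ifs <;> first | (dsimp only; omega) | (exact le_trans (by omega) (ih _ _))

-- content of line i after the 21-character prefix, stripped (the `c` of both programs)
def pvC (lines : List String) (i : Int) : String :=
  PySem.Str.strip (PySem.Str.slice (pvLine lines i) (some 21) none)

-- ---- one-step unfolding lemmas for B's loop ----
theorem pvBLoop_step_none (lines : List String) (fuel : Nat) (i : Int) (parts : List String)
    (note : String) (evs : List String) (hi : i < (lines.length : Int))
    (hp : PySem.Str.startswith (pvLine lines i) pvPrefix = true) :
    pvBLoop lines (fuel + 1) i none parts note evs =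
      pvBLoop lines fuel (i + 1) (pvBNormal (pvC lines i) parts note evs).1
        (pvBNormal (pvC lines i) parts note evs).2.1
        (pvBNormal (pvC lines i) parts note evs).2.2.1
        (pvBNormal (pvC lines i) parts note evs).2.2.2 := by
  simp only [pvBLoop, if_pos hi, hp, if_true, pvC]

theorem pvBLoop_step_slash (lines : List String) (fuel : Nat) (i : Int) (m : String)
    (parts : List String) (note : String) (evs : List String) (hi : i < (lines.length : Int))
    (hp : PySem.Str.startswith (pvLine lines i) pvPrefix = true)
    (hs : PySem.Str.startswith (pvC lines i) "/" = true) :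
    pvBLoop lines (fuel + 1) i (some m) parts note evs =
      pvBLoop lines fuel (i + 1)
        (pvBNormal (pvC lines i) parts (pvClose m parts note evs).1 (pvClose m parts note evs).2).1
        (pvBNormal (pvC lines i) parts (pvClose m parts note evs).1 (pvClose m parts note evs).2).2.1
        (pvBNormal (pvC lines i) parts (pvClose m parts note evs).1 (pvClose m parts note evs).2).2.2.1
        (pvBNormal (pvC lines i) parts (pvClose m parts note evs).1 (pvClose m parts note evs).2).2.2.2 := by
  simp only [pvC] at hs
  simp only [pvBLoop, if_pos hi, hp, if_true, hs, pvC]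

theorem pvBLoop_step_end (lines : List String) (fuel : Nat) (i : Int) (m : String)
    (parts : List String) (note : String) (evs : List String) (hi : i < (lines.length : Int))
    (hp : PySem.Str.startswith (pvLine lines i) pvPrefix = true)
    (hs : PySem.Str.startswith (pvC lines i) "/" = false)
    (he : PySem.Str.endswith (pvC lines i) "\"" = true) :
    pvBLoop lines (fuel + 1) i (some m) parts note evs =
      pvBLoop lines fuel (i + 1) none (parts ++ [pvC lines i])
        (pvClose m (parts ++ [pvC lines i]) note evs).1
        (pvClose m (parts ++ [pvC lines i]) note evs).2 := by
  simp only [pvC] at hs he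
  simp only [pvBLoop, if_pos hi, hp, if_true, hs, Bool.false_eq_true, if_false, he, pvC]

theorem pvBLoop_step_cont (lines : List String) (fuel : Nat) (i : Int) (m : String)
    (parts : List String) (note : String) (evs : List String) (hi : i < (lines.length : Int))
    (hp : PySem.Str.startswith (pvLine lines i) pvPrefix = true)
    (hs : PySem.Str.startswith (pvC lines i) "/" = false)
    (he : PySem.Str.endswith (pvC lines i) "\"" = false) :
    pvBLoop lines (fuel + 1) i (some m) parts note evs =
      pvBLoop lines fuel (i + 1) (some m) (parts ++ [pvC lines i]) note evs := by
  simp only [pvC] at hs he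
  simp only [pvBLoop, if_pos hi, hp, if_true, hs, Bool.false_eq_true, if_false, he, pvC]

theorem pvBLoop_stop_none (lines : List String) (fuel : Nat) (i : Int) (parts : List String)
    (note : String) (evs : List String) (hi : ¬ i < (lines.length : Int)) :
    pvBLoop lines fuel i none parts note evs = (note, evs) := by
  cases fuel with
  | zero => simp only [pvBLoop]
  | succ fuel => simp only [pvBLoop, if_neg hi]

theorem pvBLoop_stop_none_of_nonpref (lines : List String) (fuel : Nat) (i : Int)
    (parts : List String) (note : String) (evs : List String) (hi : i < (lines.length : Int))
    (hp : PySem.Str.startswith (pvLine lines i) pvPrefix = false) :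
    pvBLoop lines (fuel + 1) i none parts note evs = (note, evs) := by
  simp only [pvBLoop, if_pos hi, hp, Bool.false_eq_true, if_false]

theorem pvBLoop_gap_some (lines : List String) (fuel : Nat) (i : Int) (m : String)
    (parts : List String) (note : String) (evs : List String) (hi : i < (lines.length : Int))
    (hp : PySem.Str.startswith (pvLine lines i) pvPrefix = false) :
    pvBLoop lines (fuel + 1) i (some m) parts note evs =
      pvBLoop lines fuel (i + 1) none parts (pvClose m parts note evs).1 (pvClose m parts note evs).2 := by
  simp only [pvBLoop, if_pos hi, hp, Bool.false_eq_true, if_false]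

theorem pvBLoop_end_some (lines : List String) (fuel : Nat) (i : Int) (m : String)
    (parts : List String) (note : String) (evs : List String) (hi : ¬ i < (lines.length : Int)) :
    pvBLoop lines fuel i (some m) parts note evs = pvClose m parts note evs := by
  cases fuel with
  | zero => simp only [pvBLoop]
  | succ fuel => simp only [pvBLoop, if_neg hi]

-- ---- one-step lemmas for A's inner loop ----
theorem pvACollect_stop (lines : List String) (fuel : Nat) (i : Int) (parts : List String)
    (hc : ¬ (i < (lines.length : Int) ∧ PySem.Str.startswith (pvLine lines i) pvPrefix = true)) :
    pvACollect lines fuel i parts = (parts, i) := by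
  cases fuel with
  | zero => simp only [pvACollect]
  | succ fuel => simp only [pvACollect, if_neg hc]

theorem pvACollect_slash (lines : List String) (fuel : Nat) (i : Int) (parts : List String)
    (hi : i < (lines.length : Int)) (hp : PySem.Str.startswith (pvLine lines i) pvPrefix = true)
    (hs : PySem.Str.startswith (pvC lines i) "/" = true) :
    pvACollect lines (fuel + 1) i parts = (parts, i - 1) := by
  simp only [pvC] at hs
  simp only [pvACollect, if_pos (And.intro hi hp), hs, if_true]

theorem pvACollect_end (lines : List String) (fuel : Nat) (i : Int) (parts : List String)
    (hi : i < (lines.length : Int)) (hp : PySem.Str.startswith (pvLine lines i) pvPrefix = true)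
    (hs : PySem.Str.startswith (pvC lines i) "/" = false)
    (he : PySem.Str.endswith (pvC lines i) "\"" = true) :
    pvACollect lines (fuel + 1) i parts = (parts ++ [pvC lines i], i) := by
  simp only [pvC] at hs he
  simp only [pvACollect, if_pos (And.intro hi hp), hs, Bool.false_eq_true, if_false,
    pv_rstrip_strip, he, if_true, pvC]

theorem pvACollect_cont (lines : List String) (fuel : Nat) (i : Int) (parts : List String)
    (hi : i < (lines.length : Int)) (hp : PySem.Str.startswith (pvLine lines i) pvPrefix = true)
    (hs : PySem.Str.startswith (pvC lines i) "/" = false)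
    (he : PySem.Str.endswith (pvC lines i) "\"" = false) :
    pvACollect lines (fuel + 1) i parts = pvACollect lines fuel (i + 1) (parts ++ [pvC lines i]) := by
  simp only [pvC] at hs he
  simp only [pvACollect, if_pos (And.intro hi hp), hs, Bool.false_eq_true, if_false,
    pv_rstrip_strip, he, pvC]

-- ---- one-step lemmas for A's outer loop ----
theorem pvAOuter_stop (lines : List String) (fuel : Nat) (i : Int) (note : String) (evs : List String)
    (hc : ¬ (i < (lines.length : Int) ∧ PySem.Str.startswith (pvLine lines i) pvPrefix = true)) :
    pvAOuter lines fuel i note evs = (note, evs) := by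
  cases fuel with
  | zero => simp only [pvAOuter]
  | succ fuel => simp only [pvAOuter, if_neg hc]

theorem pvAOuter_note_single (lines : List String) (fuel : Nat) (i : Int) (note : String)
    (evs : List String) (hi : i < (lines.length : Int))
    (hp : PySem.Str.startswith (pvLine lines i) pvPrefix = true)
    (hn : PySem.Str.startswith (pvC lines i) "/note=\"" = true)
    (he : PySem.Str.endswith (PySem.Str.slice (pvC lines i) (some 7) none) "\"" = true) :
    pvAOuter lines (fuel + 1) i note evs =
      pvAOuter lines fuel (i + 1) (pvRstripQ (PySem.Str.slice (pvC lines i) (some 7) none)) evs := by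
  have h7 := pv_rstrip_slice_strip (PySem.Str.slice (pvLine lines i) (some 21) none) 7 (by norm_num)
  simp only [pvC] at hn he
  simp only [pvAOuter, if_pos (And.intro hi hp), hn, if_true, h7, he, Bool.true_eq_false,
    if_false, pv_join_singleton, pvC]

theorem pvAOuter_note_multi (lines : List String) (fuel : Nat) (i : Int) (note : String)
    (evs : List String) (hi : i < (lines.length : Int))
    (hp : PySem.Str.startswith (pvLine lines i) pvPrefix = true)
    (hn : PySem.Str.startswith (pvC lines i) "/note=\"" = true)
    (he : PySem.Str.endswith (PySem.Str.slice (pvC lines i) (some 7) none) "\"" = false) :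
    pvAOuter lines (fuel + 1) i note evs =
      pvAOuter lines fuel
        ((pvACollect lines fuel (i + 1) [PySem.Str.slice (pvC lines i) (some 7) none]).2 + 1)
        (pvRstripQ (PySem.Str.rstrip (PySem.Str.join " "
          (pvACollect lines fuel (i + 1) [PySem.Str.slice (pvC lines i) (some 7) none]).1))) evs := by
  have h7 := pv_rstrip_slice_strip (PySem.Str.slice (pvLine lines i) (some 21) none) 7 (by norm_num)
  simp only [pvC] at hn he
  simp only [pvAOuter, if_pos (And.intro hi hp), hn, if_true, h7, he, pvC]

theorem pvAOuter_evid_single (lines : List String) (fuel : Nat) (i : Int) (note : String)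
    (evs : List String) (hi : i < (lines.length : Int))
    (hp : PySem.Str.startswith (pvLine lines i) pvPrefix = true)
    (hn : PySem.Str.startswith (pvC lines i) "/note=\"" = false)
    (hv : PySem.Str.startswith (pvC lines i) "/evidence=\"" = true)
    (he : PySem.Str.endswith (PySem.Str.slice (pvC lines i) (some 11) none) "\"" = true) :
    pvAOuter lines (fuel + 1) i note evs =
      pvAOuter lines fuel (i + 1) note
        (if pvRstripQ (PySem.Str.slice (pvC lines i) (some 11) none) ≠ "" then
          evs ++ [pvRstripQ (PySem.Str.slice (pvC lines i) (some 11) none)] else evs) := by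
  have h11 := pv_rstrip_slice_strip (PySem.Str.slice (pvLine lines i) (some 21) none) 11 (by norm_num)
  simp only [pvC] at hn hv he
  simp only [pvAOuter, if_pos (And.intro hi hp), hn, Bool.false_eq_true, if_false, hv, if_true,
    h11, he, Bool.true_eq_false, pv_join_singleton, pvC]

theorem pvAOuter_evid_multi (lines : List String) (fuel : Nat) (i : Int) (note : String)
    (evs : List String) (hi : i < (lines.length : Int))
    (hp : PySem.Str.startswith (pvLine lines i) pvPrefix = true)
    (hn : PySem.Str.startswith (pvC lines i) "/note=\"" = false)
    (hv : PySem.Str.startswith (pvC lines i) "/evidence=\"" = true)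
    (he : PySem.Str.endswith (PySem.Str.slice (pvC lines i) (some 11) none) "\"" = false) :
    pvAOuter lines (fuel + 1) i note evs =
      pvAOuter lines fuel
        ((pvACollect lines fuel (i + 1) [PySem.Str.slice (pvC lines i) (some 11) none]).2 + 1)
        note
        (if pvRstripQ (PySem.Str.rstrip (PySem.Str.join ""
              (pvACollect lines fuel (i + 1) [PySem.Str.slice (pvC lines i) (some 11) none]).1)) ≠ "" then
          evs ++ [pvRstripQ (PySem.Str.rstrip (PySem.Str.join ""
              (pvACollect lines fuel (i + 1) [PySem.Str.slice (pvC lines i) (some 11) none]).1))] else evs) := by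
  have h11 := pv_rstrip_slice_strip (PySem.Str.slice (pvLine lines i) (some 21) none) 11 (by norm_num)
  simp only [pvC] at hn hv he
  simp only [pvAOuter, if_pos (And.intro hi hp), hn, Bool.false_eq_true, if_false, hv, if_true,
    h11, he, pvC]

theorem pvAOuter_other (lines : List String) (fuel : Nat) (i : Int) (note : String)
    (evs : List String) (hi : i < (lines.length : Int))
    (hp : PySem.Str.startswith (pvLine lines i) pvPrefix = true)
    (hn : PySem.Str.startswith (pvC lines i) "/note=\"" = false)
    (hv : PySem.Str.startswith (pvC lines i) "/evidence=\"" = false) :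
    pvAOuter lines (fuel + 1) i note evs = pvAOuter lines fuel (i + 1) note evs := by
  simp only [pvC] at hn hv
  simp only [pvAOuter, if_pos (And.intro hi hp), hn, Bool.false_eq_true, if_false, hv]

-- ---- evaluation lemmas for B's pvBNormal and pvClose ----
theorem pvBNormal_note_single (c : String) (parts : List String) (note : String) (evs : List String)
    (hn : PySem.Str.startswith c "/note=\"" = true)
    (he : PySem.Str.endswith (PySem.Str.slice c (some 7) none) "\"" = true) :
    pvBNormal c parts note evs = (none, parts, pvRstripQ (PySem.Str.slice c (some 7) none), evs) := by
  simp only [pvBNormal, hn, if_true, he]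

theorem pvBNormal_note_multi (c : String) (parts : List String) (note : String) (evs : List String)
    (hn : PySem.Str.startswith c "/note=\"" = true)
    (he : PySem.Str.endswith (PySem.Str.slice c (some 7) none) "\"" = false) :
    pvBNormal c parts note evs = (some "note", [PySem.Str.slice c (some 7) none], note, evs) := by
  simp only [pvBNormal, hn, if_true, he, Bool.false_eq_true, if_false]

theorem pvBNormal_evid_single (c : String) (parts : List String) (note : String) (evs : List String)
    (hn : PySem.Str.startswith c "/note=\"" = false)
    (hv : PySem.Str.startswith c "/evidence=\"" = true)
    (he : PySem.Str.endswith (PySem.Str.slice c (some 11) none) "\"" = true) :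
    pvBNormal c parts note evs = (none, parts, note,
      if pvRstripQ (PySem.Str.slice c (some 11) none) ≠ "" then
        evs ++ [pvRstripQ (PySem.Str.slice c (some 11) none)] else evs) := by
  simp only [pvBNormal, hn, Bool.false_eq_true, if_false, hv, if_true, he]

theorem pvBNormal_evid_multi (c : String) (parts : List String) (note : String) (evs : List String)
    (hn : PySem.Str.startswith c "/note=\"" = false)
    (hv : PySem.Str.startswith c "/evidence=\"" = true)
    (he : PySem.Str.endswith (PySem.Str.slice c (some 11) none) "\"" = false) :
    pvBNormal c parts note evs = (some "evidence", [PySem.Str.slice c (some 11) none], note, evs) := by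
  simp only [pvBNormal, hn, Bool.false_eq_true, if_false, hv, if_true, he]

theorem pvBNormal_other (c : String) (parts : List String) (note : String) (evs : List String)
    (hn : PySem.Str.startswith c "/note=\"" = false)
    (hv : PySem.Str.startswith c "/evidence=\"" = false) :
    pvBNormal c parts note evs = (none, parts, note, evs) := by
  simp only [pvBNormal, hn, Bool.false_eq_true, if_false, hv]

theorem pvClose_note (parts : List String) (note : String) (evs : List String) :
    pvClose "note" parts note evs =
      (pvRstripQ (PySem.Str.rstrip (PySem.Str.join " " parts)), evs) := by
  simp only [pvClose, if_pos (by decide : (("note" : String) == "note") = true)]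

theorem pvClose_evid (parts : List String) (note : String) (evs : List String) :
    pvClose "evidence" parts note evs =
      (note,
        if pvRstripQ (PySem.Str.rstrip (PySem.Str.join "" parts)) ≠ "" then
          evs ++ [pvRstripQ (PySem.Str.rstrip (PySem.Str.join "" parts))] else evs) := by
  simp only [pvClose]
  rw [if_neg (by decide : ¬ (("evidence" : String) == "note") = true)]

-- pvBNormal either passes parts through untouched (with no qualifier opened), or ignores it
theorem pvBNormal_parts (c : String) (parts parts' : List String) (note : String) (evs : List String) :
    (∃ w z, pvBNormal c parts note evs = (none, parts, w, z)
      ∧ pvBNormal c parts' note evs = (none, parts', w, z))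
    ∨ pvBNormal c parts note evs = pvBNormal c parts' note evs := by
  simp only [pvBNormal]
  split_ifs <;> first | exact Or.inl ⟨_, _, rfl, rfl⟩ | exact Or.inr rfl

-- pvBLoop does not depend on the exact fuel, as long as there is enough of it
theorem pvBLoop_fuel_irrel (lines : List String) :
    ∀ (fuel fuel' : Nat) (i : Int) (mode : Option String) (parts : List String) (note : String)
      (evs : List String),
      ((lines.length : Int) - i).toNat < fuel → ((lines.length : Int) - i).toNat < fuel' →
      pvBLoop lines fuel i mode parts note evs = pvBLoop lines fuel' i mode parts note evs := by
  intro fuel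
  induction fuel with
  | zero => intro fuel' i mode parts note evs h h'; omega
  | succ fuel ih =>
      intro fuel' i mode parts note evs h h'
      by_cases hi : i < (lines.length : Int)
      · obtain ⟨fuel₂, rfl⟩ : ∃ k, fuel' = k + 1 := ⟨fuel' - 1, by omega⟩
        by_cases hp : PySem.Str.startswith (pvLine lines i) pvPrefix = true
        · match mode with
          | none =>
              rw [pvBLoop_step_none lines fuel i parts note evs hi hp,
                pvBLoop_step_none lines fuel₂ i parts note evs hi hp]
              exact ih fuel₂ (i + 1) _ _ _ _ (by omega) (by omega)
          | some m =>
              by_cases hs : PySem.Str.startswith (pvC lines i) "/" = true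
              · rw [pvBLoop_step_slash lines fuel i m parts note evs hi hp hs,
                  pvBLoop_step_slash lines fuel₂ i m parts note evs hi hp hs]
                exact ih fuel₂ (i + 1) _ _ _ _ (by omega) (by omega)
              · have hs' : PySem.Str.startswith (pvC lines i) "/" = false := by simpa using hs
                by_cases he : PySem.Str.endswith (pvC lines i) "\"" = true
                · rw [pvBLoop_step_end lines fuel i m parts note evs hi hp hs' he,
                    pvBLoop_step_end lines fuel₂ i m parts note evs hi hp hs' he]
                  exact ih fuel₂ (i + 1) _ _ _ _ (by omega) (by omega)
                · have he' : PySem.Str.endswith (pvC lines i) "\"" = false := by simpa using he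
                  rw [pvBLoop_step_cont lines fuel i m parts note evs hi hp hs' he',
                    pvBLoop_step_cont lines fuel₂ i m parts note evs hi hp hs' he']
                  exact ih fuel₂ (i + 1) _ _ _ _ (by omega) (by omega)
        · have hp' : PySem.Str.startswith (pvLine lines i) pvPrefix = false := by simpa using hp
          match mode with
          | none =>
              rw [pvBLoop_stop_none_of_nonpref lines fuel i parts note evs hi hp',
                pvBLoop_stop_none_of_nonpref lines fuel₂ i parts note evs hi hp']
          | some m =>
              rw [pvBLoop_gap_some lines fuel i m parts note evs hi hp',
                pvBLoop_gap_some lines fuel₂ i m parts note evs hi hp']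
              exact ih fuel₂ (i + 1) _ _ _ _ (by omega) (by omega)
      · match mode with
        | none =>
            rw [pvBLoop_stop_none lines (fuel + 1) i parts note evs hi,
              pvBLoop_stop_none lines fuel' i parts note evs hi]
        | some m =>
            rw [pvBLoop_end_some lines (fuel + 1) i m parts note evs hi,
              pvBLoop_end_some lines fuel' i m parts note evs hi]

-- pvBLoop with no open qualifier ignores the stale parts accumulator
theorem pvBLoop_parts_irrel (lines : List String) :
    ∀ (fuel : Nat) (i : Int) (parts parts' : List String) (note : String) (evs : List String),
      pvBLoop lines fuel i none parts note evs = pvBLoop lines fuel i none parts' note evs := by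
  intro fuel
  induction fuel with
  | zero => intro i parts parts' note evs; simp only [pvBLoop]
  | succ fuel ih =>
      intro i parts parts' note evs
      by_cases hi : i < (lines.length : Int)
      · by_cases hp : PySem.Str.startswith (pvLine lines i) pvPrefix = true
        · rw [pvBLoop_step_none lines fuel i parts note evs hi hp,
            pvBLoop_step_none lines fuel i parts' note evs hi hp]
          rcases pvBNormal_parts (pvC lines i) parts parts' note evs with ⟨w, z, h1, h2⟩ | hsame
          · rw [h1, h2]
            exact ih (i + 1) _ _ _ _
          · rw [hsame]
        · have hp' : PySem.Str.startswith (pvLine lines i) pvPrefix = false := by simpa using hp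
          rw [pvBLoop_stop_none_of_nonpref lines fuel i parts note evs hi hp',
            pvBLoop_stop_none_of_nonpref lines fuel i parts' note evs hi hp']
      · rw [pvBLoop_stop_none lines (fuel + 1) i parts note evs hi,
          pvBLoop_stop_none lines (fuel + 1) i parts' note evs hi]

-- running B in collecting mode from i equals A's inner loop, the close, and B restarted
theorem pvBLoop_collect (lines : List String) :
    ∀ (fuel fc fr : Nat) (i : Int) (m : String) (parts : List String) (note : String)
      (evs : List String),
      ((lines.length : Int) - i).toNat < fuel → ((lines.length : Int) - i).toNat < fc →
      ((lines.length : Int) - i).toNat < fr →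
      pvBLoop lines fuel i (some m) parts note evs =
        pvBLoop lines fr ((pvACollect lines fc i parts).2 + 1) none []
          (pvClose m (pvACollect lines fc i parts).1 note evs).1
          (pvClose m (pvACollect lines fc i parts).1 note evs).2 := by
  intro fuel
  induction fuel with
  | zero => intro fc fr i m parts note evs h _ _; omega
  | succ fuel ih =>
      intro fc fr i m parts note evs h hc hr
      by_cases hi : i < (lines.length : Int)
      · obtain ⟨fc₁, rfl⟩ : ∃ k, fc = k + 1 := ⟨fc - 1, by omega⟩
        by_cases hp : PySem.Str.startswith (pvLine lines i) pvPrefix = true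
        · by_cases hs : PySem.Str.startswith (pvC lines i) "/" = true
          · rw [pvBLoop_step_slash lines fuel i m parts note evs hi hp hs,
              pvACollect_slash lines fc₁ i parts hi hp hs]
            dsimp only
            rw [sub_add_cancel]
            obtain ⟨fr₁, rfl⟩ : ∃ k, fr = k + 1 := ⟨fr - 1, by omega⟩
            rw [pvBLoop_step_none lines fr₁ i [] _ _ hi hp]
            rcases pvBNormal_parts (pvC lines i) parts []
                (pvClose m parts note evs).1 (pvClose m parts note evs).2 with ⟨w, z, h1, h2⟩ | hsame
            · rw [h1, h2]
              dsimp only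
              rw [pvBLoop_parts_irrel lines fuel (i + 1) parts [] w z]
              exact pvBLoop_fuel_irrel lines fuel fr₁ (i + 1) none [] w z (by omega) (by omega)
            · rw [hsame]
              exact pvBLoop_fuel_irrel lines fuel fr₁ (i + 1) _ _ _ _ (by omega) (by omega)
          · have hs' : PySem.Str.startswith (pvC lines i) "/" = false := by simpa using hs
            by_cases he : PySem.Str.endswith (pvC lines i) "\"" = true
            · rw [pvBLoop_step_end lines fuel i m parts note evs hi hp hs' he,
                pvACollect_end lines fc₁ i parts hi hp hs' he]
              dsimp only
              rw [pvBLoop_parts_irrel lines fuel (i + 1) (parts ++ [pvC lines i]) [] _ _]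
              exact pvBLoop_fuel_irrel lines fuel fr (i + 1) none [] _ _ (by omega) (by omega)
            · have he' : PySem.Str.endswith (pvC lines i) "\"" = false := by simpa using he
              rw [pvBLoop_step_cont lines fuel i m parts note evs hi hp hs' he',
                pvACollect_cont lines fc₁ i parts hi hp hs' he']
              have hr' : ((lines.length : Int) - (i + 1)).toNat < fr := by omega
              have := ih fc₁ fr (i + 1) m (parts ++ [pvC lines i]) note evs (by omega) (by omega) hr'
              exact this
        · have hp' : PySem.Str.startswith (pvLine lines i) pvPrefix = false := by simpa using hp
          rw [pvBLoop_gap_some lines fuel i m parts note evs hi hp',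
            pvACollect_stop lines (fc₁ + 1) i parts (fun hcc => hp hcc.2)]
          dsimp only
          rw [pvBLoop_parts_irrel lines fuel (i + 1) parts [] _ _]
          exact pvBLoop_fuel_irrel lines fuel fr (i + 1) none [] _ _ (by omega) (by omega)
      · rw [pvBLoop_end_some lines (fuel + 1) i m parts note evs hi,
          pvACollect_stop lines fc i parts (fun hcc => hi hcc.1)]
        dsimp only
        rw [pvBLoop_stop_none lines fr (i + 1) [] _ _ (by omega)]

-- the main invariant: A's outer loop equals B's flat scan in normal mode
theorem pvMain (lines : List String) :
    ∀ (fuel : Nat) (i : Int) (note : String) (evs : List String),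
      ((lines.length : Int) - i).toNat < fuel →
      pvAOuter lines fuel i note evs = pvBLoop lines fuel i none [] note evs := by
  intro fuel
  induction fuel with
  | zero => intro i note evs h; omega
  | succ fuel ih =>
      intro i note evs h
      by_cases hi : i < (lines.length : Int)
      · by_cases hp : PySem.Str.startswith (pvLine lines i) pvPrefix = true
        · rw [pvBLoop_step_none lines fuel i [] note evs hi hp]
          by_cases hn : PySem.Str.startswith (pvC lines i) "/note=\"" = true
          · by_cases he : PySem.Str.endswith (PySem.Str.slice (pvC lines i) (some 7) none) "\"" = true
            · rw [pvAOuter_note_single lines fuel i note evs hi hp hn he,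
                pvBNormal_note_single (pvC lines i) [] note evs hn he]
              dsimp only
              exact ih (i + 1) _ _ (by omega)
            · have he' : PySem.Str.endswith (PySem.Str.slice (pvC lines i) (some 7) none) "\"" = false := by
                simpa using he
              rw [pvAOuter_note_multi lines fuel i note evs hi hp hn he',
                pvBNormal_note_multi (pvC lines i) [] note evs hn he']
              dsimp only
              rw [pvBLoop_collect lines fuel fuel fuel (i + 1) "note"
                [PySem.Str.slice (pvC lines i) (some 7) none] note evs (by omega) (by omega) (by omega)]
              rw [pvClose_note]
              dsimp only
              have hge := pvACollect_ge lines fuel (i + 1) [PySem.Str.slice (pvC lines i) (some 7) none]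
              exact ih ((pvACollect lines fuel (i + 1) [PySem.Str.slice (pvC lines i) (some 7) none]).2 + 1)
                _ _ (by omega)
          · have hn' : PySem.Str.startswith (pvC lines i) "/note=\"" = false := by simpa using hn
            by_cases hv : PySem.Str.startswith (pvC lines i) "/evidence=\"" = true
            · by_cases he : PySem.Str.endswith (PySem.Str.slice (pvC lines i) (some 11) none) "\"" = true
              · rw [pvAOuter_evid_single lines fuel i note evs hi hp hn' hv he,
                  pvBNormal_evid_single (pvC lines i) [] note evs hn' hv he]
                dsimp only
                exact ih (i + 1) _ _ (by omega)
              · have he' : PySem.Str.endswith (PySem.Str.slice (pvC lines i) (some 11) none) "\"" = false := by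
                  simpa using he
                rw [pvAOuter_evid_multi lines fuel i note evs hi hp hn' hv he',
                  pvBNormal_evid_multi (pvC lines i) [] note evs hn' hv he']
                dsimp only
                rw [pvBLoop_collect lines fuel fuel fuel (i + 1) "evidence"
                  [PySem.Str.slice (pvC lines i) (some 11) none] note evs (by omega) (by omega) (by omega)]
                rw [pvClose_evid]
                dsimp only
                have hge := pvACollect_ge lines fuel (i + 1) [PySem.Str.slice (pvC lines i) (some 11) none]
                exact ih ((pvACollect lines fuel (i + 1) [PySem.Str.slice (pvC lines i) (some 11) none]).2 + 1)
                  _ _ (by omega)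
            · have hv' : PySem.Str.startswith (pvC lines i) "/evidence=\"" = false := by simpa using hv
              rw [pvAOuter_other lines fuel i note evs hi hp hn' hv',
                pvBNormal_other (pvC lines i) [] note evs hn' hv']
              dsimp only
              exact ih (i + 1) note evs (by omega)
        · have hp' : PySem.Str.startswith (pvLine lines i) pvPrefix = false := by simpa using hp
          rw [pvAOuter_stop lines (fuel + 1) i note evs (fun hc => hp hc.2),
            pvBLoop_stop_none_of_nonpref lines fuel i [] note evs hi hp']
      · rw [pvAOuter_stop lines (fuel + 1) i note evs (fun hc => hi hc.1),
          pvBLoop_stop_none lines (fuel + 1) i [] note evs hi]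

-- ===== VERDICT (by name: the statement is the Claim_ definition above) =====
theorem extract_ptm_details_spec : Claim_equal_extract_ptm_details := by
  intro lines start_idx _ _
  unfold Spec_extract_ptm_details extract_ptm_details extract_ptm_details_alt
  rw [pvMain lines (((lines.length : Int) - (start_idx + 1)).toNat + 1) (start_idx + 1) "" []
    (by omega)]
  cases h : (pvBLoop lines (((lines.length : Int) - (start_idx + 1)).toNat + 1) (start_idx + 1) none [] "" []).2 with
  | nil =>
      simp only [h, ne_eq, not_true_eq_false, if_false]
      exact congrArg _ (by decide)
  | cons a t => simp only [h, ne_eq, reduceCtorEq, not_false_eq_true, if_true]
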